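-- pv_equiv track=rewrite | github.com/xyvivian/ALARM | lookout/lookout.py | assign_scores
-- ===== SOURCE A (Python) =====
-- def assign_scores(cluster_rank, outliers):
--     plot_best = {}
--     for plot_n,plot in enumerate(cluster_rank):
--         for outlier in plot:
--             idx = outlier[0]
--             score = outlier[1]
--             if idx in outliers:
--                 if idx not in plot_best.keys():
--                     plot_best[idx]= (plot_n,score)
--                 elif plot_best[idx][1] <= score:
--                     plot_best[idx] = (plot_n,score)
--     return plot_best
-- ===== SOURCE B (Python) =====
-- def assign_scores(cluster_rank, outliers):
--     # Collect-then-reduce: first group every qualifying (plot_n, score) by outlier idx,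
--     # then pick each group's best by max over the key (score, plot_n).
--     groups = {}
--     for plot_n, plot in enumerate(cluster_rank):
--         for idx, score in plot:
--             if idx in outliers:
--                 groups.setdefault(idx, []).append((plot_n, score))
--     return {idx: max(entries, key=lambda e: (e[1], e[0])) for idx, entries in groups.items()}
-- ===== Notes on version B (the rewrite author's own statement) =====
-- stated objective: alternative
-- what changed: Replaces A's running-best update inside the scan (compare-and-overwrite per element) by a two-phase collect-then-reduce: one pass groups all qualifying (plot_n, score) pairs per outlier idx, then each group is reduced independently with max over the key (score, plot_n).
import Mathlib
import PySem

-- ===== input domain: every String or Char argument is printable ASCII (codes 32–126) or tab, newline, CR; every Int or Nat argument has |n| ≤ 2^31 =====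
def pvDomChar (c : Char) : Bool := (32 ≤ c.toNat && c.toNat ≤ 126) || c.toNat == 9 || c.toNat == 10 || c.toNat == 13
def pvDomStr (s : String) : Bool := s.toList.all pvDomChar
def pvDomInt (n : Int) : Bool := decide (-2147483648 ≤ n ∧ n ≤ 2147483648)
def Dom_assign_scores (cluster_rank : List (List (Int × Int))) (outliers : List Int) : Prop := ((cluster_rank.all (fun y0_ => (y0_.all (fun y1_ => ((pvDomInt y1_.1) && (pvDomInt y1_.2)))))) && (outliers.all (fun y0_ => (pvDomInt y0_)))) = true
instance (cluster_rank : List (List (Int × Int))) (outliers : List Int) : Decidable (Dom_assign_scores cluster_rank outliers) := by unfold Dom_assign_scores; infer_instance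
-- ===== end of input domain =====

-- B replaces A's in-scan running-best update by collect-per-idx then reduce-by-max (objective: alternative decomposition).

-- ===== PORT A =====
-- loop body of A's inner 'for outlier in plot' (plot_n is the enumerate index);
-- plot_best[idx][1] is read with getD under the 'idx in plot_best' guard, so no KeyError is possible
def pvStepA (outliers : List Int) (plot_n : Int) (plot_best : PySem.Dict Int (Int × Int))
    (outlier : Int × Int) : PySem.Dict Int (Int × Int) :=
  let idx := outlier.1
  let score := outlier.2
  if outliers.contains idx then
    if plot_best.contains idx = false then plot_best.insert idx (plot_n, score)
    else if (plot_best.getD idx (0, 0)).2 ≤ score then plot_best.insert idx (plot_n, score)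
    else plot_best
  else plot_best

def assign_scores (cluster_rank : List (List (Int × Int))) (outliers : List Int) : List (Int × Int × Int) :=
  ((PySem.List.enumerate cluster_rank 0).foldl
    (fun plot_best pe => pe.2.foldl (pvStepA outliers pe.1) plot_best)
    PySem.Dict.empty).items

-- ===== PORT B =====
-- loop body of B's grouping pass: groups.setdefault(idx, []).append((plot_n, score))
def pvStepB (outliers : List Int) (plot_n : Int) (groups : PySem.Dict Int (List (Int × Int)))
    (o : Int × Int) : PySem.Dict Int (List (Int × Int)) :=
  if outliers.contains o.1 then groups.modify o.1 [] (fun l => l ++ [(plot_n, o.2)]) else groups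

-- max(entries, key=lambda e: (e[1], e[0])): Python's max keeps the first maximum, so the
-- accumulator is replaced only on a strictly lex-greater key; written out because Lean's
-- Prod '<' is not Python's tuple lexicographic order. [] is unreachable (groups are non-empty).
def pvMax (entries : List (Int × Int)) : Int × Int :=
  match entries with
  | [] => (0, 0)
  | e :: es => es.foldl (fun b x => if b.2 < x.2 ∨ (b.2 = x.2 ∧ b.1 < x.1) then x else b) e

def assign_scores_alt (cluster_rank : List (List (Int × Int))) (outliers : List Int) : List (Int × Int × Int) :=
  ((PySem.List.enumerate cluster_rank 0).foldl
    (fun groups pe => pe.2.foldl (pvStepB outliers pe.1) groups)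
    PySem.Dict.empty).items.map (fun kv => (kv.1, pvMax kv.2))

-- ===== PRECONDITION & SPEC =====
def Spec_assign_scores (cluster_rank : List (List (Int × Int))) (outliers : List Int) (out : List (Int × Int × Int)) : Prop := out = assign_scores_alt cluster_rank outliers
instance (cluster_rank : List (List (Int × Int))) (outliers : List Int) (out : List (Int × Int × Int)) : Decidable (Spec_assign_scores cluster_rank outliers out) := by unfold Spec_assign_scores; infer_instance

-- ===== CLAIM (what is proved, stated in full; the proofs are below) =====
def Claim_equal_assign_scores : Prop := ∀ (cluster_rank : List (List (Int × Int))) (outliers : List Int), Dom_assign_scores cluster_rank outliers → Spec_assign_scores cluster_rank outliers (assign_scores cluster_rank outliers)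

-- ===== LEMMAS AND PROOFS =====

-- invariant tying A's dict to B's groups dict
def pvInv (g : PySem.Dict Int (List (Int × Int))) (d : PySem.Dict Int (Int × Int)) : Prop :=
  d.items = g.items.map (fun kv => (kv.1, pvMax kv.2)) ∧ g.keys.Nodup ∧ ∀ kv ∈ g.items, kv.2 ≠ []

-- all plot indices stored so far are ≤ n
def pvBound (n : Int) (g : PySem.Dict Int (List (Int × Int))) : Prop :=
  ∀ kv ∈ g.items, ∀ e ∈ kv.2, e.1 ≤ n

theorem pvMax_mem (e : Int × Int) (es : List (Int × Int)) :
    es.foldl (fun b x => if b.2 < x.2 ∨ (b.2 = x.2 ∧ b.1 < x.1) then x else b) e ∈ e :: es := by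
  induction es generalizing e with
  | nil => simp
  | cons x xs ih =>
    simp only [List.foldl_cons]
    rcases List.mem_cons.1 (ih (if e.2 < x.2 ∨ (e.2 = x.2 ∧ e.1 < x.1) then x else e)) with h | h
    · rw [h]; by_cases hc : e.2 < x.2 ∨ (e.2 = x.2 ∧ e.1 < x.1) <;> simp [hc]
    · simp [h]

theorem pvMax_snoc (f : Int × Int) (fs : List (Int × Int)) (v : Int × Int)
    (hb : ∀ e ∈ f :: fs, e.1 ≤ v.1) :
    pvMax ((f :: fs) ++ [v]) = if (pvMax (f :: fs)).2 ≤ v.2 then v else pvMax (f :: fs) := by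
  have h1 : (pvMax (f :: fs)).1 ≤ v.1 := hb _ (by
    have := pvMax_mem f fs
    simpa [pvMax] using this)
  have hrw : pvMax ((f :: fs) ++ [v]) =
      (if (pvMax (f :: fs)).2 < v.2 ∨ ((pvMax (f :: fs)).2 = v.2 ∧ (pvMax (f :: fs)).1 < v.1)
        then v else pvMax (f :: fs)) := by
    simp [pvMax, List.foldl_append]
  rw [hrw]
  rcases lt_trichotomy (pvMax (f :: fs)).2 v.2 with h | h | h
  · simp [h, le_of_lt h]
  · by_cases h2 : (pvMax (f :: fs)).1 < v.1
    · simp [h, h2]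
    · have hv : pvMax (f :: fs) = v := Prod.ext_iff.2 ⟨le_antisymm h1 (not_lt.1 h2), h⟩
      simp [hv]
  · have hne : (pvMax (f :: fs)).2 ≠ v.2 := ne_of_gt h
    simp [not_lt.2 h.le, hne, not_le.2 h]

theorem pvStep_inv (outliers : List Int) (n : Int) (o : Int × Int)
    (g : PySem.Dict Int (List (Int × Int))) (d : PySem.Dict Int (Int × Int))
    (hinv : pvInv g d) (hbd : pvBound n g) :
    pvInv (pvStepB outliers n g o) (pvStepA outliers n d o) ∧ pvBound n (pvStepB outliers n g o) := by
  obtain ⟨hitems, hnd, hne⟩ := hinv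
  unfold pvStepA pvStepB
  by_cases ho : outliers.contains o.1
  case neg => rw [if_neg ho, if_neg ho]; exact ⟨⟨hitems, hnd, hne⟩, hbd⟩
  rw [if_pos ho, if_pos ho]
  have hkeys : d.keys = g.keys := by
    simp only [PySem.Dict.keys, hitems, List.map_map]; rfl
  have hcont : d.contains o.1 = g.contains o.1 := by
    rw [PySem.Dict.contains_eq_decide_mem_keys, PySem.Dict.contains_eq_decide_mem_keys, hkeys]
  by_cases hc : g.contains o.1 = true
  · -- key already present
    have hdc : d.contains o.1 = true := by rw [hcont]; exact hc
    rw [PySem.Dict.modify, if_neg (by simp [hdc])]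
    have hdnd : d.keys.Nodup := by rw [hkeys]; exact hnd
    -- pointwise facts for the key element
    have hpt : ∀ p ∈ g.items, p.1 = o.1 →
        d.getD o.1 (0, 0) = pvMax p.2 ∧ g.getD o.1 [] = p.2 := by
      intro p hp hpk
      constructor
      · have : (p.1, pvMax p.2) ∈ d.items := by rw [hitems]; exact List.mem_map_of_mem hp
        rw [← hpk]; exact PySem.Dict.getD_of_mem_items d (by simpa using this) hdnd _
      · rw [← hpk]; exact PySem.Dict.getD_of_mem_items g (by simpa using hp) hnd _
    have hBitems : (g.insert o.1 (g.getD o.1 [] ++ [(n, o.2)])).items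
        = g.items.map (fun p => if p.1 == o.1 then (o.1, g.getD o.1 [] ++ [(n, o.2)]) else p) :=
      PySem.Dict.items_insert_of_contains g _ hc
    refine ⟨⟨?_, ?_, ?_⟩, ?_⟩
    · -- items equality
      rw [hBitems, List.map_map]
      by_cases hle : (d.getD o.1 (0, 0)).2 ≤ o.2
      · rw [if_pos hle]
        rw [PySem.Dict.items_insert_of_contains d _ hdc, hitems, List.map_map]
        refine List.map_congr_left ?_
        intro p hp
        by_cases hpk : p.1 = o.1
        · obtain ⟨hda, hga⟩ := hpt p hp hpk
          obtain ⟨f, fs, hffs⟩ := List.exists_cons_of_ne_nil (hne p hp)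
          have hsnoc := pvMax_snoc f fs (n, o.2) (by
            intro e he
            rw [← hffs] at he
            exact hbd p hp e he)
          rw [hffs] at hda
          simp only [Function.comp, hpk, hga, beq_iff_eq, if_true, hffs]
          rw [hsnoc, ← hda]
          simp [hle]
        · simp [Function.comp, hpk]
      · rw [if_neg hle, hitems]
        refine (List.map_congr_left ?_).symm
        intro p hp
        by_cases hpk : p.1 = o.1
        · obtain ⟨hda, hga⟩ := hpt p hp hpk
          obtain ⟨f, fs, hffs⟩ := List.exists_cons_of_ne_nil (hne p hp)
          have hsnoc := pvMax_snoc f fs (n, o.2) (by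
            intro e he; rw [← hffs] at he; exact hbd p hp e he)
          rw [hffs] at hda
          simp only [Function.comp, hpk, hga, beq_iff_eq, if_true, hffs]
          rw [hsnoc, ← hda]
          simp [hle]
        · simp [Function.comp, hpk]
    · -- keys nodup
      rw [PySem.Dict.keys_insert_of_contains g _ hc]; exact hnd
    · -- values nonempty
      intro kv hkv
      rw [hBitems] at hkv
      obtain ⟨p, hp, hpe⟩ := List.mem_map.1 hkv
      by_cases hpk : p.1 = o.1
      · rw [← hpe]; simp [hpk]
      · rw [← hpe]; simp only [beq_iff_eq, if_neg hpk]; exact hne p hp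
    · -- bound
      intro kv hkv
      rw [hBitems] at hkv
      obtain ⟨p, hp, hpe⟩ := List.mem_map.1 hkv
      by_cases hpk : p.1 = o.1
      · obtain ⟨hda, hga⟩ := hpt p hp hpk
        rw [← hpe]
        simp only [hpk, beq_iff_eq, if_true, hga]
        intro e he
        rcases List.mem_append.1 he with h | h
        · exact hbd p hp e h
        · simp at h; simp [h]
      · rw [← hpe]; simp only [beq_iff_eq, if_neg hpk]; exact hbd p hp
  · -- new key
    simp only [Bool.not_eq_true] at hc
    have hdc : d.contains o.1 = false := by rw [hcont]; exact hc
    rw [PySem.Dict.modify, PySem.Dict.getD_of_not_contains g _ hc, if_pos hdc]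
    have hB := PySem.Dict.items_insert_of_not_contains g ([] ++ [(n, o.2)]) hc
    have hA := PySem.Dict.items_insert_of_not_contains d (n, o.2) hdc
    refine ⟨⟨?_, ?_, ?_⟩, ?_⟩
    · rw [hA, hB, hitems, List.map_append]; rfl
    · rw [PySem.Dict.keys_insert_of_not_contains g _ hc]
      have : o.1 ∉ g.keys := by
        intro hmem
        rw [← PySem.Dict.contains_iff_mem_keys] at hmem
        rw [hc] at hmem; exact Bool.false_ne_true hmem
      exact List.Nodup.append hnd (List.nodup_singleton _)
        (by simpa [List.disjoint_singleton] using this)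
    · intro kv hkv
      rw [hB] at hkv
      rcases List.mem_append.1 hkv with h | h
      · exact hne kv h
      · simp at h; rw [h]; simp
    · intro kv hkv
      rw [hB] at hkv
      rcases List.mem_append.1 hkv with h | h
      · exact hbd kv h
      · simp at h
        intro e he
        rw [h] at he
        simp at he
        simp [he]

theorem pvInner_inv (outliers : List Int) (n : Int) (plot : List (Int × Int))
    (g : PySem.Dict Int (List (Int × Int))) (d : PySem.Dict Int (Int × Int))
    (hinv : pvInv g d) (hbd : pvBound n g) :
    pvInv (plot.foldl (pvStepB outliers n) g) (plot.foldl (pvStepA outliers n) d) ∧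
      pvBound n (plot.foldl (pvStepB outliers n) g) := by
  induction plot generalizing g d with
  | nil => exact ⟨hinv, hbd⟩
  | cons p ps ih =>
    obtain ⟨h1, h2⟩ := pvStep_inv outliers n p g d hinv hbd
    exact ih _ _ h1 h2

theorem pvOuter_inv (outliers : List Int) (cr : List (List (Int × Int))) (s : Int)
    (g : PySem.Dict Int (List (Int × Int))) (d : PySem.Dict Int (Int × Int))
    (hinv : pvInv g d) (hbd : pvBound (s - 1) g) :
    pvInv ((PySem.List.enumerate cr s).foldl (fun g pe => pe.2.foldl (pvStepB outliers pe.1) g) g)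
          ((PySem.List.enumerate cr s).foldl (fun d pe => pe.2.foldl (pvStepA outliers pe.1) d) d) := by
  induction cr generalizing s g d with
  | nil => exact hinv
  | cons plot rest ih =>
    simp only [PySem.List.enumerate_cons, List.foldl_cons]
    obtain ⟨h1, h2⟩ := pvInner_inv outliers s plot g d hinv
      (fun kv hkv e he => le_trans (hbd kv hkv e he) (by omega))
    exact ih (s + 1) _ _ h1 (fun kv hkv e he => by have := h2 kv hkv e he; omega)

-- ===== VERDICT (by name: the statement is the Claim_ definition above) =====
theorem assign_scores_spec : Claim_equal_assign_scores := by
  intro cluster_rank outliers _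
  unfold Spec_assign_scores assign_scores assign_scores_alt
  have h := pvOuter_inv outliers cluster_rank 0 PySem.Dict.empty PySem.Dict.empty
    ⟨by simp [PySem.Dict.empty], by simp [PySem.Dict.keys_empty], by simp [PySem.Dict.empty]⟩
    (by intro kv hkv; simp [PySem.Dict.empty] at hkv)
  exact h.1
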